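-- pv_equiv track=rewrite | github.com/cmm2209/VW-XSD | spacy_training/json_to_spacy.py | is_valid_contraction
-- ===== SOURCE A (Python) =====
-- def is_punct_token(tok):
--     """
--     Returns True if this token should be excluded from all join
--     calculations (surface key construction, analyses building,
--     norm pair assembly).  Currently excludes any token whose
--     pos_upos is "PUNCT".
--     """
--     return tok.get("pos_upos", "") == "PUNCT"
--
-- def is_valid_field(value):
--     """
--     Returns True if a form or norm field value is non-empty
--     and contains at least one non-whitespace character.
--     """
--     return bool(value and value.strip())
--
-- def is_valid_contraction(sorted_group):
--     """
--     Returns False if the group should NOT be treated as a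
--     genuine MWT contraction, for any of the following reasons:
--
--     - Fewer than two tokens total
--     - After removing PUNCT tokens, fewer than two tokens remain
--       (a group that consists of only one content token plus
--       punctuation is not a genuine morphological contraction)
--     - After removing PUNCT tokens, fewer than two tokens have
--       non-empty form fields
--     - After removing PUNCT tokens, there is not at least one
--       join=right/both AND one join=left/both token
--     - The final *non-PUNCT* token (i.e. the last token of the
--       content part) has pos_upos = "PUNCT" — this guard is now
--       redundant given the filtering above but is kept for safety
--
--     All join-direction and form-count checks operate exclusively
--     on the non-PUNCT subset so that attached punctuation cannot
--     masquerade as a contraction component.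
--     """
--     if len(sorted_group) < 2:
--         return False
--
--     # All join-related checks are performed on the non-PUNCT subset
--     non_punct = [t for t in sorted_group if not is_punct_token(t)]
--
--     if len(non_punct) < 2:
--         return False
--
--     # At least two non-PUNCT tokens must have non-empty form fields
--     tokens_with_forms = [
--         t for t in non_punct
--         if is_valid_field(t.get("form", ""))
--     ]
--     if len(tokens_with_forms) < 2:
--         return False
--
--     has_right = any(
--         t.get("join") in ("right", "both") for t in non_punct
--     )
--     has_left  = any(
--         t.get("join") in ("left",  "both") for t in non_punct
--     )
--     if not (has_right and has_left):
--         return False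
--
--     # Safety check: final non-PUNCT token must not itself be PUNCT
--     # (should be unreachable after the filter above, but kept for
--     # defensive correctness)
--     final_pos = non_punct[-1].get("pos_upos", "")
--     if final_pos == "PUNCT":
--         return False
--
--     return True
-- ===== SOURCE B (Python) =====
-- def is_valid_field(value):
--     """
--     Returns True if a form or norm field value is non-empty
--     and contains at least one non-whitespace character.
--     """
--     return bool(value and value.strip())
--
-- def is_valid_contraction(sorted_group):
--     """
--     Single-pass re-implementation: one loop over sorted_group
--     maintaining running counters/flags for the non-PUNCT tokens,
--     instead of building intermediate filtered lists and doing
--     separate any() scans.  The short-group guard and the final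
--     "last non-PUNCT token is PUNCT" guard are both implied by the
--     counters (non_punct_count >= 2 forces len >= 2, and a
--     non-PUNCT token is never PUNCT), so they are not re-checked.
--     """
--     non_punct_count = 0
--     forms_count = 0
--     saw_right = False
--     saw_left = False
--     for t in sorted_group:
--         if t.get("pos_upos", "") == "PUNCT":
--             continue
--         non_punct_count += 1
--         if is_valid_field(t.get("form", "")):
--             forms_count += 1
--         j = t.get("join")
--         if j in ("right", "both"):
--             saw_right = True
--         if j in ("left", "both"):
--             saw_left = True
--     return non_punct_count >= 2 and forms_count >= 2 and saw_right and saw_left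
-- ===== Notes on version B (the rewrite author's own statement) =====
-- stated objective: simpler
-- what changed: Replaces A's intermediate filtered lists, two separate any() scans and two redundant guards (the len<2 check and the final-non-PUNCT-is-PUNCT check, both implied by the counters) with a single loop maintaining two counters and two flags.
import Mathlib
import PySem

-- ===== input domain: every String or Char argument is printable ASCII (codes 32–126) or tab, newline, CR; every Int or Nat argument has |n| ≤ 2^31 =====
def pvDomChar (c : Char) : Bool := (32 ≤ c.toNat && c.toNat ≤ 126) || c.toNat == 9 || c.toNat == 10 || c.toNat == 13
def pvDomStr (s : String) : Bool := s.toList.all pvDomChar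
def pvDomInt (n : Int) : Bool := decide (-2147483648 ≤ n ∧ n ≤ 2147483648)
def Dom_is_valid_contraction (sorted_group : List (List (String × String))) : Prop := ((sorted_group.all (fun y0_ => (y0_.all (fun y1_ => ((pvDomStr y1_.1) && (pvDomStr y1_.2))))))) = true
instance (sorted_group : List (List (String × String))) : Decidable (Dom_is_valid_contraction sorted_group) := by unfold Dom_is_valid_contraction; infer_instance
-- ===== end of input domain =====

-- B: one loop over the group maintaining counters/flags instead of A's intermediate
-- filtered lists, separate any() scans and two redundant guards (objective: simpler).


-- ===== PORT A =====
-- tok.get(k, "")  — first-match lookup on the association list, default ""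
def tokGetD (tok : List (String × String)) (k : String) : String :=
  (tok.lookup k).getD ""

def is_punct_token (tok : List (String × String)) : Bool :=
  tokGetD tok "pos_upos" == "PUNCT"

def is_valid_field (value : String) : Bool :=
  !(value == "") && !(PySem.Str.strip value == "")

def is_valid_contraction (sorted_group : List (List (String × String))) : Bool :=
  if sorted_group.length < 2 then false
  else
    let non_punct := sorted_group.filter (fun t => !is_punct_token t)
    if non_punct.length < 2 then false
    else
      let tokens_with_forms := non_punct.filter (fun t => is_valid_field (tokGetD t "form"))
      if tokens_with_forms.length < 2 then false
      else
        let has_right := non_punct.any (fun t => t.lookup "join" == some "right" || t.lookup "join" == some "both")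
        let has_left  := non_punct.any (fun t => t.lookup "join" == some "left"  || t.lookup "join" == some "both")
        if !(has_right && has_left) then false
        else
          -- non_punct[-1]; the 'none' (IndexError) branch is unreachable since non_punct.length ≥ 2
          match PySem.List.pyGet? non_punct (-1) with
          | none => false
          | some last =>
            let final_pos := tokGetD last "pos_upos"
            if final_pos == "PUNCT" then false else true

-- ===== PORT B =====
-- loop state: (non_punct_count, forms_count, saw_right, saw_left)
def bStep (st : Nat × Nat × Bool × Bool) (t : List (String × String)) : Nat × Nat × Bool × Bool :=
  if tokGetD t "pos_upos" == "PUNCT" then st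
  else
    let st1 := (st.1 + 1, st.2.1 + (if is_valid_field (tokGetD t "form") then 1 else 0), st.2.2.1, st.2.2.2)
    let j := t.lookup "join"
    let st2 := if j == some "right" || j == some "both" then (st1.1, st1.2.1, true, st1.2.2.2) else st1
    if j == some "left" || j == some "both" then (st2.1, st2.2.1, st2.2.2.1, true) else st2

def is_valid_contraction_alt (sorted_group : List (List (String × String))) : Bool :=
  let st := sorted_group.foldl bStep (0, 0, false, false)
  decide (2 ≤ st.1) && decide (2 ≤ st.2.1) && st.2.2.1 && st.2.2.2

-- ===== PRECONDITION & SPEC =====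
def Spec_is_valid_contraction (sorted_group : List (List (String × String))) (out : Bool) : Prop := out = is_valid_contraction_alt sorted_group
instance (sorted_group : List (List (String × String))) (out : Bool) : Decidable (Spec_is_valid_contraction sorted_group out) := by unfold Spec_is_valid_contraction; infer_instance

-- ===== CLAIM (what is proved, stated in full; the proofs are below) =====
def Claim_equal_is_valid_contraction : Prop := ∀ (sorted_group : List (List (String × String))), Dom_is_valid_contraction sorted_group → Spec_is_valid_contraction sorted_group (is_valid_contraction sorted_group)

-- ===== LEMMAS AND PROOFS =====

-- characterisation of B's loop: the fold computes A's filter/filter/any/any values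
theorem bFold_eq (xs : List (List (String × String))) (a b : Nat) (r l : Bool) :
    xs.foldl bStep (a, b, r, l) =
      (a + (xs.filter (fun t => !is_punct_token t)).length,
       b + ((xs.filter (fun t => !is_punct_token t)).filter (fun t => is_valid_field (tokGetD t "form"))).length,
       r || (xs.filter (fun t => !is_punct_token t)).any (fun t => t.lookup "join" == some "right" || t.lookup "join" == some "both"),
       l || (xs.filter (fun t => !is_punct_token t)).any (fun t => t.lookup "join" == some "left" || t.lookup "join" == some "both")) := by
  induction xs generalizing a b r l with
  | nil => simp
  | cons x xs ih =>
    have hpe : is_punct_token x = (tokGetD x "pos_upos" == "PUNCT") := rfl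
    rcases hp : (tokGetD x "pos_upos" == "PUNCT") with _ | _
    · have hfc : List.filter (fun t => !is_punct_token t) (x::xs) = x :: List.filter (fun t => !is_punct_token t) xs := by
        rw [List.filter_cons, hpe, hp]; simp
      simp only [List.foldl_cons, bStep, hp, Bool.false_eq_true, if_false]
      rcases hf : is_valid_field (tokGetD x "form") with _ | _ <;>
      rcases hr : (List.lookup "join" x == some "right" || List.lookup "join" x == some "both") with _ | _ <;>
      rcases hl : (List.lookup "join" x == some "left" || List.lookup "join" x == some "both") with _ | _ <;>
        simp only [hf, hr, hl, Bool.false_eq_true, if_false, if_true] <;>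
        rw [ih, hfc] <;>
        simp only [List.filter_cons, hf, Bool.false_eq_true, if_false, if_true, List.length_cons,
          List.any_cons, hr, hl, Prod.mk.injEq, Bool.false_or, Bool.true_or, Bool.or_true,
          Bool.or_false] <;>
        (and_intros <;> first | rfl | omega | simp)
    · have hfc : List.filter (fun t => !is_punct_token t) (x::xs) = List.filter (fun t => !is_punct_token t) xs := by
        rw [List.filter_cons, hpe, hp]; simp
      simp only [List.foldl_cons, bStep, hp, if_true, ih, hfc]

-- ===== VERDICT (by name: the statement is the Claim_ definition above) =====
theorem is_valid_contraction_spec : Claim_equal_is_valid_contraction := by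
  intro sg _
  show is_valid_contraction sg = is_valid_contraction_alt sg
  unfold is_valid_contraction is_valid_contraction_alt
  rw [bFold_eq]
  simp only [Nat.zero_add, Bool.false_or]
  set F := sg.filter (fun t => !is_punct_token t) with hF
  by_cases h2 : F.length < 2
  · have hd1 : decide (2 ≤ F.length) = false := by simp; omega
    by_cases hsg : sg.length < 2
    · simp [hsg, hd1]
    · simp [hsg, h2, hd1]
  · have hd1 : decide (2 ≤ F.length) = true := by simp; omega
    have hlen : ¬ sg.length < 2 := by
      have := List.length_filter_le (fun t => !is_punct_token t) sg
      rw [← hF] at this; omega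
    by_cases hfq : (F.filter (fun t => is_valid_field (tokGetD t "form"))).length < 2
    · have hd2 : decide (2 ≤ (F.filter (fun t => is_valid_field (tokGetD t "form"))).length) = false := by
        simp; omega
      simp [hlen, h2, hfq, hd1, hd2]
    · have hd2 : decide (2 ≤ (F.filter (fun t => is_valid_field (tokGetD t "form"))).length) = true := by
        simp; omega
      by_cases hAr : F.any (fun t => t.lookup "join" == some "right" || t.lookup "join" == some "both") = true
      · by_cases hAl : F.any (fun t => t.lookup "join" == some "left" || t.lookup "join" == some "both") = true
        · have hne : F ≠ [] := by
            intro h; rw [h] at h2; exact h2 (by simp)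
          obtain ⟨t, ht⟩ := Option.isSome_iff_exists.mp (List.getLast?_isSome.mpr hne)
          have ht' : PySem.List.pyGet? F (-1) = some t := by
            rw [PySem.List.pyGet?_neg_one]; exact ht
          have hmem : t ∈ F := PySem.List.mem_of_pyGet?_eq_some _ ht'
          have hnp : (tokGetD t "pos_upos" == "PUNCT") = false := by
            have h1 : is_punct_token t = false := by
              have := List.of_mem_filter (by rw [hF] at hmem; exact hmem : t ∈ sg.filter (fun t => !is_punct_token t)); simpa using this
            exact h1
          simp [hlen, h2, hfq, hd1, hd2, hAr, hAl, ht', hnp]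
        · simp [hlen, h2, hfq, hd1, hd2, hAr, hAl]
      · simp [hlen, h2, hfq, hd1, hd2, hAr]
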